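-- pv_equiv track=rewrite | github.com/ahmedha-data-analyst/ad_wwu_flow_pressure | app.py | split_series_columns
-- ===== SOURCE A (Python) =====
-- def split_series_columns(columns):
--     flow_cols = [
--         c
--         for c in columns
--         if any(token in c.lower() for token in ("flow", "scmh", "kscmh", "mcm/d"))
--     ]
--     pressure_cols = [c for c in columns if "pressure" in c.lower() or "outlet" in c.lower()]
--     other_cols = [c for c in columns if c not in flow_cols + pressure_cols]
--     return flow_cols, pressure_cols, other_cols
-- ===== SOURCE B (Python) =====
-- def split_series_columns(columns):
--     flow_cols, pressure_cols, other_cols = [], [], []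
--     for c in columns:
--         low = c.lower()
--         is_flow = any(token in low for token in ("flow", "scmh", "kscmh", "mcm/d"))
--         is_pressure = "pressure" in low or "outlet" in low
--         if is_flow:
--             flow_cols.append(c)
--         if is_pressure:
--             pressure_cols.append(c)
--         if not is_flow and not is_pressure:
--             other_cols.append(c)
--     return flow_cols, pressure_cols, other_cols
-- ===== Notes on version B (the rewrite author's own statement) =====
-- stated objective: alternative
-- what changed: Single pass over columns appending to three accumulators with the lowercase computed once per column, instead of three separate comprehensions plus a membership scan over flow_cols + pressure_cols for other_cols.
import Mathlib
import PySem

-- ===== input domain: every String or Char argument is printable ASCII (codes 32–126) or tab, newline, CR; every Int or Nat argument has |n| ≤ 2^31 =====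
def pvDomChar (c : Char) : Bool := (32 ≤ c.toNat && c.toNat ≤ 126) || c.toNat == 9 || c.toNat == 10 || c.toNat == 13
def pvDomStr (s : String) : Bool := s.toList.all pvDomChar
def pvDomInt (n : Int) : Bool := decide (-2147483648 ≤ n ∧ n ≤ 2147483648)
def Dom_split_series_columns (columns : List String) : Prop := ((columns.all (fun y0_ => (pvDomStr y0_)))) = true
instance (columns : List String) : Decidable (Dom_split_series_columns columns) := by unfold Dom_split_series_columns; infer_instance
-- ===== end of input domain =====

-- B replaces A's three comprehensions and quadratic membership scan by one accumulator
-- pass over the columns (equal return value; neither mutates its argument).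

-- ===== PORT A =====
def pvTokens : List String := ["flow", "scmh", "kscmh", "mcm/d"]

def split_series_columns (columns : List String) : List String × List String × List String :=
  let flow_cols := columns.filter (fun c => pvTokens.any (fun token => PySem.Str.isIn token (PySem.Str.lower c)))
  let pressure_cols := columns.filter (fun c => PySem.Str.isIn "pressure" (PySem.Str.lower c) || PySem.Str.isIn "outlet" (PySem.Str.lower c))
  let other_cols := columns.filter (fun c => !((flow_cols ++ pressure_cols).contains c))
  (flow_cols, pressure_cols, other_cols)

-- ===== PORT B =====
def pvIsFlow (c : String) : Bool :=
  let low := PySem.Str.lower c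
  pvTokens.any (fun token => PySem.Str.isIn token low)

def pvIsPressure (c : String) : Bool :=
  let low := PySem.Str.lower c
  PySem.Str.isIn "pressure" low || PySem.Str.isIn "outlet" low

def pvStep (acc : List String × List String × List String) (c : String) :
    List String × List String × List String :=
  let is_flow := pvIsFlow c
  let is_pressure := pvIsPressure c
  let acc1 := if is_flow then (acc.1 ++ [c], acc.2.1, acc.2.2) else acc
  let acc2 := if is_pressure then (acc1.1, acc1.2.1 ++ [c], acc1.2.2) else acc1
  if !is_flow && !is_pressure then (acc2.1, acc2.2.1, acc2.2.2 ++ [c]) else acc2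

def split_series_columns_alt (columns : List String) : List String × List String × List String :=
  columns.foldl pvStep ([], [], [])

-- ===== PRECONDITION & SPEC =====
def Spec_split_series_columns (columns : List String) (out : List String × List String × List String) : Prop := out = split_series_columns_alt columns
instance (columns : List String) (out : List String × List String × List String) : Decidable (Spec_split_series_columns columns out) := by unfold Spec_split_series_columns; infer_instance

-- ===== CLAIM (what is proved, stated in full; the proofs are below) =====
def Claim_equal_split_series_columns : Prop := ∀ (columns : List String), Dom_split_series_columns columns → Spec_split_series_columns columns (split_series_columns columns)

-- ===== LEMMAS AND PROOFS =====

theorem pv_alt_invariant (cols : List String) (f pr o : List String) :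
    cols.foldl pvStep (f, pr, o)
    = (f ++ cols.filter pvIsFlow, pr ++ cols.filter pvIsPressure,
       o ++ cols.filter (fun c => !pvIsFlow c && !pvIsPressure c)) := by
  induction cols generalizing f pr o with
  | nil => simp
  | cons c rest ih =>
    simp only [List.foldl_cons, List.filter_cons]
    cases hf : pvIsFlow c <;> cases hp : pvIsPressure c <;>
      simp [pvStep, hf, hp, ih]

theorem pv_other_eq (cols : List String) :
    cols.filter (fun c => !((cols.filter pvIsFlow ++ cols.filter pvIsPressure).contains c))
      = cols.filter (fun c => !pvIsFlow c && !pvIsPressure c) := by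
  apply List.filter_congr
  intro c hc
  by_cases hf : pvIsFlow c = true <;> by_cases hp : pvIsPressure c = true <;>
    simp [List.mem_filter, hc, hf, hp]

-- ===== VERDICT (by name: the statement is the Claim_ definition above) =====
theorem split_series_columns_spec : Claim_equal_split_series_columns := by
  intro columns _
  show split_series_columns columns = split_series_columns_alt columns
  unfold split_series_columns split_series_columns_alt
  rw [pv_alt_invariant]
  simp only [List.nil_append]
  exact congrArg _ (congrArg _ (pv_other_eq columns))
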